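-- pv_equiv track=rewrite | github.com/m1sterzer0/codejams | 2010/1B/A.py | splitDirs
-- ===== SOURCE A (Python) =====
-- def splitDirs(s) :
--     ans = []
--     x = ""
--     a = s[1:].split('/')
--     for aa in a :
--         x = x + '/' + aa
--         ans.append(x)
--     return ans
-- ===== SOURCE B (Python) =====
-- def splitDirs(s):
--     t = s[1:]
--     ps = [i for i, c in enumerate(t) if c == '/']
--     ps.append(len(t))
--     return ['/' + t[:p] for p in ps]
-- ===== Notes on version B (the rewrite author's own statement) =====
-- stated objective: alternative
-- what changed: B scans once for the slash-delimiter positions and emits each prefix by slicing the path at every boundary, instead of A splitting on the delimiter and growing an accumulator string piece by piece.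
import Mathlib
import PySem

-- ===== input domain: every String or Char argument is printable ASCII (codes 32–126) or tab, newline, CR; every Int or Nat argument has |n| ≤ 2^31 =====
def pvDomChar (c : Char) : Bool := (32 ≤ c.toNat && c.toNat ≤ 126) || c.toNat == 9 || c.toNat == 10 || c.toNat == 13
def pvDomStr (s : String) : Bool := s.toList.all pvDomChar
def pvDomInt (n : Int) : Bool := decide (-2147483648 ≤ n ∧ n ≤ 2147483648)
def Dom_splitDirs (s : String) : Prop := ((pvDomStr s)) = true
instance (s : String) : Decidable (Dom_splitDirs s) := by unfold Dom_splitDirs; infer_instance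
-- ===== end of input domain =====

-- B replaces A's split-then-accumulate prefix string by one scan for '/' positions plus slicing; same cost, different decomposition.


-- ===== PORT A =====
-- a = s[1:].split('/'); for aa in a: x = x + '/' + aa; ans.append(x)
def splitDirs (s : String) : List String :=
  let a := PySem.Chars.splitOn (PySem.List.slice s.toList (some 1) none) ['/']
  (a.foldl (fun (st : List String × List Char) aa =>
      let x := st.2 ++ '/' :: aa
      (st.1 ++ [String.ofList x], x)) ([], [])).1

-- ===== PORT B =====
-- t = s[1:]; ps = slash positions ++ [len(t)]; return ['/' + t[:p] for p in ps]
def splitDirs_alt (s : String) : List String :=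
  let t := PySem.List.slice s.toList (some 1) none
  let ps : List Int :=
    ((PySem.List.enumerate t).filter (fun ic => ic.2 == '/')).map Prod.fst ++ [(t.length : Int)]
  ps.map (fun p => String.ofList ('/' :: PySem.List.slice t none (some p)))

-- ===== PRECONDITION & SPEC =====
def Spec_splitDirs (s : String) (out : List String) : Prop := out = splitDirs_alt s
instance (s : String) (out : List String) : Decidable (Spec_splitDirs s out) := by unfold Spec_splitDirs; infer_instance

-- ===== CLAIM (what is proved, stated in full; the proofs are below) =====
def Claim_equal_splitDirs : Prop := ∀ (s : String), Dom_splitDirs s → Spec_splitDirs s (splitDirs s)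

-- ===== LEMMAS AND PROOFS =====

-- reference single-char split, for reasoning about PySem.Chars.splitOn _ ['/']
def mySplit (pre : List Char) : List Char → List (List Char)
  | [] => [pre]
  | c :: rest => if c = '/' then pre :: mySplit [] rest else mySplit (pre ++ [c]) rest

-- positions of '/' in a char list
def slashPos : List Char → List Nat
  | [] => []
  | c :: rest => if c = '/' then 0 :: (slashPos rest).map (· + 1) else (slashPos rest).map (· + 1)

theorem go_eq (fuel : Nat) : ∀ (l cur acc : _), l.length < fuel →
    PySem.Chars.splitOn.go ['/'] fuel l cur acc = acc.reverse ++ mySplit cur.reverse l := by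
  induction fuel with
  | zero => intro l cur acc h; omega
  | succ f ih =>
    intro l cur acc h
    cases l with
    | nil => simp [PySem.Chars.splitOn.go, mySplit]
    | cons c rest =>
      by_cases hc : c = '/'
      · subst hc
        rw [show PySem.Chars.splitOn.go ['/'] (f+1) ('/'::rest) cur acc
              = PySem.Chars.splitOn.go ['/'] f rest [] (cur.reverse :: acc) by
            simp [PySem.Chars.splitOn.go, List.isPrefixOf]]
        rw [ih rest [] (cur.reverse :: acc) (by simpa using Nat.lt_of_succ_lt_succ h)]
        simp [mySplit]
      · rw [show PySem.Chars.splitOn.go ['/'] (f+1) (c::rest) cur acc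
              = PySem.Chars.splitOn.go ['/'] f rest (c :: cur) acc by
            have hc' : ¬('/' = c) := fun h => hc h.symm
            simp [PySem.Chars.splitOn.go, List.isPrefixOf, hc']]
        rw [ih rest (c :: cur) acc (by simpa using Nat.lt_of_succ_lt_succ h)]
        simp [mySplit, hc]

theorem splitOn_eq (t : List Char) : PySem.Chars.splitOn t ['/'] = mySplit [] t := by
  have := go_eq (t.length + 1) t [] [] (by omega)
  simpa [PySem.Chars.splitOn] using this

theorem fold_eq (t : List Char) : ∀ (pre x : List Char) (ans : List String),
    ((mySplit pre t).foldl (fun (st : List String × List Char) aa =>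
        let x := st.2 ++ '/' :: aa
        (st.1 ++ [String.ofList x], x)) (ans, x)).1
      = ans ++ ((slashPos t).map (fun n => String.ofList (x ++ '/' :: (pre ++ t.take n)))
          ++ [String.ofList (x ++ '/' :: (pre ++ t))]) := by
  induction t with
  | nil => intro pre x ans; simp [mySplit, slashPos]
  | cons c rest ih =>
    intro pre x ans
    by_cases hc : c = '/'
    · simp only [mySplit, slashPos, if_pos hc, List.foldl_cons]
      rw [ih [] (x ++ '/' :: pre) (ans ++ [String.ofList (x ++ '/' :: pre)])]
      subst hc
      simp [List.map_map, Function.comp]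
    · simp only [mySplit, slashPos, if_neg hc]
      rw [ih (pre ++ [c]) x ans]
      simp [List.map_map, Function.comp]

theorem enum_eq (t : List Char) : ∀ (k : Int),
    ((PySem.List.enumerate t k).filter (fun ic => ic.2 == '/')).map Prod.fst
      = (slashPos t).map (fun (n : Nat) => k + (n : Int)) := by
  induction t with
  | nil => intro k; simp [PySem.List.enumerate, slashPos]
  | cons c rest ih =>
    intro k
    have henum : PySem.List.enumerate (c::rest) k = (k,c) :: PySem.List.enumerate rest (k+1) := by
      simp [PySem.List.enumerate]
    by_cases hc : c = '/'
    · rw [henum, List.filter_cons_of_pos (by simpa using hc)]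
      simp only [slashPos, if_pos hc, List.map_cons]
      rw [ih (k+1)]
      simp only [List.map_map]
      refine List.cons_eq_cons.mpr ⟨by simp, ?_⟩
      apply List.map_congr_left
      intro n _
      simp only [Function.comp_apply]
      omega
    · rw [henum, List.filter_cons_of_neg (by simpa using hc)]
      simp only [slashPos, if_neg hc]
      rw [ih (k+1)]
      simp only [List.map_map]
      apply List.map_congr_left
      intro n _
      simp only [Function.comp_apply]
      omega

-- ===== VERDICT (by name: the statement is the Claim_ definition above) =====
theorem splitDirs_spec : Claim_equal_splitDirs := by
  intro s _
  unfold Spec_splitDirs splitDirs splitDirs_alt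
  set t := PySem.List.slice s.toList (some 1) none with ht
  rw [splitOn_eq, fold_eq t [] [] []]
  rw [List.map_append, enum_eq t 0]
  simp only [List.map_map, List.nil_append, List.map_cons, List.map_nil]
  congr 1
  · apply List.map_congr_left
    intro n hn
    have h0 : (0 : Int) + (n : Int) = ((n : Nat) : Int) := by omega
    simp only [Function.comp_apply, h0, PySem.List.slice_to_natCast]
  · rw [PySem.List.slice_to_natCast]
    simp
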